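-- pv_equiv track=rewrite | github.com/uroca/duplicate_photo_finder | dupe_photo_finder/model.py | scan_metadata_list_for_duplicates
-- ===== SOURCE A (Python) =====
-- def scan_metadata_list_for_duplicates(local_files):
--     found = []
--     while len(local_files) > 1:
--         file = local_files.pop()
--         copies = [x for x in local_files if x == file]
--         if len(copies) > 0:
--             copies.append(file)
--             found.append(copies)
--         local_files = [x for x in local_files if x != file]
--     return found
-- ===== SOURCE B (Python) =====
-- def scan_metadata_list_for_duplicates(local_files):
--     counts = {}
--     for x in local_files:
--         counts[x] = counts.get(x, 0) + 1
--     found = []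
--     seen = set()
--     for x in reversed(local_files):
--         if x not in seen:
--             seen.add(x)
--             if counts[x] > 1:
--                 found.append([x] * counts[x])
--     return found
-- ===== Notes on version B (the rewrite author's own statement) =====
-- stated objective: faster
-- what changed: A repeatedly pops the last element and rescans/refilters the whole remaining list per distinct value (quadratic); B makes one counting pass over the list and one reversed dedup pass, emitting [x]*count for each value with count>1 in descending last-occurrence order.
import Mathlib
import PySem

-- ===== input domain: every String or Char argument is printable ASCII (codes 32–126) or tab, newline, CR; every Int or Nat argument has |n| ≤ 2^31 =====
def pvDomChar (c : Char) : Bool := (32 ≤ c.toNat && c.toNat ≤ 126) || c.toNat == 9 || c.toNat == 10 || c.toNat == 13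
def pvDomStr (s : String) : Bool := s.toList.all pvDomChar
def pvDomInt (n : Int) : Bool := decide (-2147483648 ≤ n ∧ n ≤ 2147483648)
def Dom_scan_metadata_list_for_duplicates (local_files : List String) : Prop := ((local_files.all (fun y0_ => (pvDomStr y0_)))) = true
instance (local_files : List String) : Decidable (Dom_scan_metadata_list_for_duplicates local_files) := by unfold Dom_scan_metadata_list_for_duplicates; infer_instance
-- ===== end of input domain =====

-- B replaces A's quadratic pop/filter rounds by one counting pass + one reversed dedup pass (same return value;
-- A also pops one element off the caller's list in place, which B does not — the claim is about the return value only).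

-- ===== PORT A =====
-- the while loop: pop the last element, collect its copies, drop all its occurrences, repeat while len > 1
def scanAloop (ls : List String) (found : List (List String)) : List (List String) :=
  if h : 1 < ls.length then
    let file := ls.getLast (by intro hn; rw [hn] at h; simp at h)
    let rest := ls.dropLast
    let copies := rest.filter (fun x => x == file)
    let found' := if 0 < copies.length then found ++ [copies ++ [file]] else found
    scanAloop (rest.filter (fun x => x != file)) found'
  else found
termination_by ls.length
decreasing_by
  have h1 := List.length_filter_le (fun x => x != ls.getLast (by intro hn; rw [hn] at h; simp at h)) ls.dropLast
  have h2 : ls.dropLast.length = ls.length - 1 := ls.length_dropLast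
  omega

def scan_metadata_list_for_duplicates (local_files : List String) : List (List String) :=
  scanAloop local_files []

-- ===== PORT B =====
-- counts[x] in the second loop is exact as getD: every x drawn from the list is a key of counts
def scan_metadata_list_for_duplicates_alt (local_files : List String) : List (List String) :=
  let counts := local_files.foldl (fun d x => d.insert x (d.getD x 0 + 1)) (PySem.Dict.empty : PySem.Dict String Int)
  (local_files.reverse.foldl
    (fun (p : List (List String) × PySem.Set String) x =>
      if PySem.Set.contains p.2 x then p
      else ((if counts.getD x 0 > 1 then p.1 ++ [List.replicate (counts.getD x 0).toNat x] else p.1),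
            PySem.Set.add p.2 x))
    ([], PySem.Set.empty)).1

-- ===== PRECONDITION & SPEC =====
def Spec_scan_metadata_list_for_duplicates (local_files : List String) (out : List (List String)) : Prop := out = scan_metadata_list_for_duplicates_alt local_files
instance (local_files : List String) (out : List (List String)) : Decidable (Spec_scan_metadata_list_for_duplicates local_files out) := by unfold Spec_scan_metadata_list_for_duplicates; infer_instance

-- ===== CLAIM (what is proved, stated in full; the proofs are below) =====
def Claim_equal_scan_metadata_list_for_duplicates : Prop := ∀ (local_files : List String), Dom_scan_metadata_list_for_duplicates local_files → Spec_scan_metadata_list_for_duplicates local_files (scan_metadata_list_for_duplicates local_files)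

-- ===== LEMMAS AND PROOFS =====

-- proof-side skeleton of B's second pass, with the count lookup abstracted to cnt
def rscan (cnt : String → Int) : List String → PySem.Set String → List (List String)
  | [], _ => []
  | x :: xs, seen =>
    if PySem.Set.contains seen x then rscan cnt xs seen
    else (if cnt x > 1 then [List.replicate (cnt x).toNat x] else []) ++ rscan cnt xs (PySem.Set.add seen x)

lemma scanAloop_acc_aux (n : Nat) : ∀ (ls : List String) (found : List (List String)),
    ls.length ≤ n → scanAloop ls found = found ++ scanAloop ls [] := by
  induction n with
  | zero =>
    intro ls found h
    rw [scanAloop, scanAloop]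
    simp [show ¬ 1 < ls.length by omega]
  | succ n ih =>
    intro ls found h
    by_cases h1 : 1 < ls.length
    · rw [scanAloop, scanAloop]
      simp only [dif_pos h1]
      have hlen : (ls.dropLast.filter (fun x => x != ls.getLast (by intro hn; rw [hn] at h1; simp at h1))).length ≤ n := by
        have := List.length_filter_le (fun x => x != ls.getLast (by intro hn; rw [hn] at h1; simp at h1)) ls.dropLast
        have h2 : ls.dropLast.length = ls.length - 1 := ls.length_dropLast
        omega
      split
      · rw [List.nil_append, ih _ _ hlen]
        conv_rhs => rw [ih _ _ hlen]
        simp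
      · exact ih _ _ hlen
    · rw [scanAloop, scanAloop]
      simp [dif_neg h1]

lemma scanAloop_acc (ls : List String) (found : List (List String)) :
    scanAloop ls found = found ++ scanAloop ls [] :=
  scanAloop_acc_aux ls.length ls found le_rfl

lemma foldB_eq_rscan (d : PySem.Dict String Int) (xs : List String)
    (acc : List (List String)) (seen : PySem.Set String) :
    (xs.foldl
      (fun (p : List (List String) × PySem.Set String) x =>
        if PySem.Set.contains p.2 x then p
        else ((if d.getD x 0 > 1 then p.1 ++ [List.replicate (d.getD x 0).toNat x] else p.1),
              PySem.Set.add p.2 x))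
      (acc, seen)).1 = acc ++ rscan (fun x => d.getD x 0) xs seen := by
  induction xs generalizing acc seen with
  | nil => simp [rscan]
  | cons x xs ih =>
    rw [List.foldl_cons]
    simp only []
    by_cases hc : PySem.Set.contains seen x = true
    · rw [if_pos hc, ih]
      simp only [rscan, hc, if_true]
    · have hcf : PySem.Set.contains seen x = false := by rwa [Bool.not_eq_true] at hc
      rw [if_neg hc]
      simp only [rscan, hcf, Bool.false_eq_true, if_false]
      by_cases hg : d.getD x 0 > 1
      · rw [if_pos hg, if_pos hg, ih]; simp
      · rw [if_neg hg, if_neg hg, ih]; simp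

lemma rscan_congr (cnt cnt' : String → Int) (xs : List String) (seen : PySem.Set String)
    (h : ∀ x ∈ xs, cnt x = cnt' x) : rscan cnt xs seen = rscan cnt' xs seen := by
  induction xs generalizing seen with
  | nil => simp [rscan]
  | cons x xs ih =>
    simp only [rscan]
    rw [h x (by simp), ih _ (fun y hy => h y (by simp [hy])), ih _ (fun y hy => h y (by simp [hy]))]

-- rscan only consults seen through membership
lemma rscan_seen_congr (cnt : String → Int) (xs : List String) (seen seen' : PySem.Set String)
    (h : ∀ y, y ∈ seen ↔ y ∈ seen') : rscan cnt xs seen = rscan cnt xs seen' := by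
  induction xs generalizing seen seen' with
  | nil => simp [rscan]
  | cons x xs ih =>
    simp only [rscan]
    have hc : PySem.Set.contains seen x = PySem.Set.contains seen' x := by
      rw [Bool.eq_iff_iff, PySem.Set.contains_iff, PySem.Set.contains_iff]; exact h x
    rw [hc]
    by_cases hx : PySem.Set.contains seen' x = true
    · simp only [if_pos hx]; exact ih _ _ h
    · simp only [if_neg hx]
      congr 1
      exact ih _ _ (fun y => by rw [PySem.Set.mem_add, PySem.Set.mem_add, h y])

-- elements already in seen may be filtered out of the remaining traversal
lemma rscan_filter_seen (cnt : String → Int) (file : String) (xs : List String)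
    (seen : PySem.Set String) (hf : file ∈ seen) :
    rscan cnt xs seen = rscan cnt (xs.filter (fun x => x != file)) seen := by
  induction xs generalizing seen with
  | nil => simp
  | cons x xs ih =>
    by_cases hx : x = file
    · subst hx
      have hc : PySem.Set.contains seen x = true := (PySem.Set.contains_iff _ _).mpr hf
      rw [List.filter_cons, if_neg (by simp)]
      simp only [rscan, hc, if_true]
      exact ih _ hf
    · rw [List.filter_cons, if_pos (by simp [hx])]
      simp only [rscan]
      by_cases hc : PySem.Set.contains seen x = true
      · simp only [if_pos hc]; exact ih _ hf
      · simp only [if_neg hc]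
        congr 1
        exact ih _ ((PySem.Set.mem_add _ _ _).mpr (Or.inl hf))

-- adding an element that never occurs in xs to seen does not change the scan
lemma rscan_add_not_mem (cnt : String → Int) (file : String) (xs : List String)
    (seen : PySem.Set String) (hf : file ∉ xs) :
    rscan cnt xs (PySem.Set.add seen file) = rscan cnt xs seen := by
  induction xs generalizing seen with
  | nil => simp [rscan]
  | cons x xs ih =>
    have hx : x ≠ file := by intro h; exact hf (h ▸ List.mem_cons_self ..)
    have htail : file ∉ xs := fun h => hf (List.mem_cons_of_mem _ h)
    simp only [rscan]
    have hc : PySem.Set.contains (PySem.Set.add seen file) x = PySem.Set.contains seen x := by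
      rw [Bool.eq_iff_iff, PySem.Set.contains_iff, PySem.Set.contains_iff, PySem.Set.mem_add]
      exact ⟨fun h => h.resolve_right hx, Or.inl⟩
    rw [hc]
    by_cases hxc : PySem.Set.contains seen x = true
    · simp only [if_pos hxc]; exact ih _ htail
    · simp only [if_neg hxc]
      congr 1
      rw [rscan_seen_congr cnt xs (PySem.Set.add (PySem.Set.add seen file) x)
            (PySem.Set.add (PySem.Set.add seen x) file)
            (fun y => by rw [PySem.Set.mem_add, PySem.Set.mem_add, PySem.Set.mem_add, PySem.Set.mem_add]; tauto)]
      exact ih _ htail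

-- B as rscan over the reversed input with counts = occurrence counts
lemma alt_eq_rscan (ls : List String) :
    scan_metadata_list_for_duplicates_alt ls
      = rscan (fun x => (ls.count x : Int)) ls.reverse PySem.Set.empty := by
  rw [scan_metadata_list_for_duplicates_alt]
  rw [foldB_eq_rscan]
  simp only [List.nil_append]
  exact rscan_congr _ _ _ _ (fun x _ => by
    show (List.foldl (fun d x => d.insert x (d.getD x 0 + 1)) (PySem.Dict.empty : PySem.Dict String Int) ls).getD x 0 = _
    rw [PySem.Dict.foldl_insert_getD_add_one_eq_counter, PySem.Dict.getD_counter])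

-- the main induction: A's loop from an empty accumulator computes B's reverse scan
lemma scanAloop_eq_rscan_aux (n : Nat) : ∀ (ls : List String), ls.length ≤ n →
    scanAloop ls [] = rscan (fun x => (ls.count x : Int)) ls.reverse PySem.Set.empty := by
  induction n with
  | zero =>
    intro ls h
    have : ls = [] := List.length_eq_zero_iff.mp (Nat.le_zero.mp h)
    subst this; rw [scanAloop]; simp [rscan]
  | succ n ih =>
    intro ls h
    rcases ls.eq_nil_or_concat with rfl | ⟨rest, file, rfl⟩
    · rw [scanAloop]; simp [rscan]
    simp only [List.concat_eq_append] at h ⊢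
    by_cases h1 : 1 < (rest ++ [file]).length
    · -- main round: pop file, emit its copies if any, continue on the rest without file
      rw [scanAloop]
      simp only [dif_pos h1, List.getLast_concat, List.dropLast_concat, List.nil_append]
      rw [scanAloop_acc]
      have hlen : (rest.filter (fun x => x != file)).length ≤ n := by
        have := List.length_filter_le (fun x => x != file) rest
        simp only [List.length_append, List.length_cons, List.length_nil] at h
        omega
      rw [ih _ hlen]
      rw [List.reverse_concat]
      simp only [rscan]
      rw [show PySem.Set.contains (PySem.Set.empty : PySem.Set String) file = false from rfl]
      simp only [Bool.false_eq_true, if_false]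
      have hnm : file ∉ (rest.filter (fun x => x != file)).reverse := by
        simp [List.mem_filter]
      rw [rscan_filter_seen _ file rest.reverse (PySem.Set.add PySem.Set.empty file)
            ((PySem.Set.mem_add _ _ _).mpr (Or.inr rfl))]
      rw [List.filter_reverse]
      rw [rscan_add_not_mem _ file _ _ hnm]
      rw [rscan_congr (fun x => ((rest ++ [file]).count x : Int))
            (fun x => ((rest.filter (fun y => y != file)).count x : Int)) _ _ (by
        intro x hx
        have hxf : x ≠ file := by
          intro hxe; subst hxe; exact hnm hx
        show (((rest ++ [file]).count x : Nat) : Int) = ((rest.filter (fun y => y != file)).count x : Int)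
        have h1c : (rest ++ [file]).count x = rest.count x := by
          simp [List.count_append, Ne.symm hxf]
        have h2c : (rest.filter (fun y => y != file)).count x = rest.count x :=
          List.count_filter (by simp [hxf])
        rw [h1c, h2c])]
      congr 1
      have hcopies : rest.filter (fun x => x == file) = List.replicate (rest.count file) file :=
        List.filter_beq file
      have hlsf : (rest ++ [file]).count file = rest.count file + 1 := by
        simp [List.count_append]
      by_cases hpos : 0 < rest.count file
      · rw [if_pos (by rw [hcopies]; simpa using hpos),
            if_pos (by rw [hlsf]; exact_mod_cast by omega)]
        rw [hcopies, hlsf]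
        rw [show (((rest.count file + 1 : Nat) : Int)).toNat = rest.count file + 1 by omega]
        rw [List.replicate_succ' (n := rest.count file)]
      · rw [if_neg (by rw [hcopies]; simpa using hpos),
            if_neg (by rw [hlsf]; omega)]
    · -- rest is empty: a one-element list, no round runs and no count exceeds 1
      have hr : rest = [] := by
        simp only [List.length_append, List.length_cons, List.length_nil] at h1
        exact List.length_eq_zero_iff.mp (by omega)
      subst hr
      rw [scanAloop]
      simp [rscan, List.count_singleton]

lemma scanAloop_eq_rscan (ls : List String) :
    scanAloop ls [] = rscan (fun x => (ls.count x : Int)) ls.reverse PySem.Set.empty :=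
  scanAloop_eq_rscan_aux ls.length ls le_rfl

-- ===== VERDICT (by name: the statement is the Claim_ definition above) =====
theorem scan_metadata_list_for_duplicates_spec : Claim_equal_scan_metadata_list_for_duplicates := by
  intro ls _
  show scan_metadata_list_for_duplicates ls = scan_metadata_list_for_duplicates_alt ls
  rw [scan_metadata_list_for_duplicates, scanAloop_eq_rscan, alt_eq_rscan]
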